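-- pv_equiv track=rewrite | github.com/ansible/workshops | demos/chatops/chatops_pb/roles/ansible-network.network-engine/filter_plugins/network_engine.py | _gen_ranges
-- ===== SOURCE A (Python) =====
-- def _gen_ranges(vlan):
--     s = e = None
--     for i in sorted(vlan):
--         if s is None:
--             s = e = i
--         elif i == e or i == e + 1:
--             e = i
--         else:
--             yield (s, e)
--             s = e = i
--     if s is not None:
--         yield (s, e)
-- ===== SOURCE B (Python) =====
-- from itertools import groupby
--
--
-- def _gen_ranges(vlan):
--     vals = sorted(set(vlan))
--     for _, grp in groupby(enumerate(vals), key=lambda p: p[1] - p[0]):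
--         grp = list(grp)
--         yield (grp[0][1], grp[-1][1])
-- ===== Notes on version B (the rewrite author's own statement) =====
-- stated objective: idiomatic
-- what changed: Replaces A's explicit running start/end state machine with its three-way branching by the standard-library idiom sorted(set(vlan)) + itertools.groupby on the index-offset key i - idx, which collects each maximal consecutive run as one group.
import Mathlib
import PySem

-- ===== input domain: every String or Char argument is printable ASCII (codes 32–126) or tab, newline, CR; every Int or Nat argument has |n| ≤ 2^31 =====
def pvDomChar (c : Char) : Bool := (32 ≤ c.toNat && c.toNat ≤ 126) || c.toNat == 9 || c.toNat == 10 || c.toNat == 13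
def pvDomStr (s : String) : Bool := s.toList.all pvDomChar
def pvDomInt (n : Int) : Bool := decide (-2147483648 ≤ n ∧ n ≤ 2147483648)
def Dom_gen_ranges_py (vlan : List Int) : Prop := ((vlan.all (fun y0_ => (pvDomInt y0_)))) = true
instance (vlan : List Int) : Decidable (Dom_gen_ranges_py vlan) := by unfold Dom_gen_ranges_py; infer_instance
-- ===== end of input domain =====

-- B replaces A's three-way running start/end state machine by sorted(set(·)) + itertools.groupby
-- on the index-offset key — an idiomatic, structurally different computation of the same ranges.
-- Both are generators in Python; equivalence is about the materialized sequence of pairs.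

-- ===== PORT A =====
-- A's loop: state (s,e) as Option (Int × Int) (None before the first element), yields accumulated in order.
def gen_ranges_py_step (st : Option (Int × Int) × List (Int × Int)) (i : Int) :
    Option (Int × Int) × List (Int × Int) :=
  match st with
  | (none, acc) => (some (i, i), acc)          -- s = e = i
  | (some (s, e), acc) =>
    if i = e ∨ i = e + 1 then (some (s, i), acc)   -- e = i
    else (some (i, i), acc ++ [(s, e)])            -- yield (s, e); s = e = i

def gen_ranges_py (vlan : List Int) : List (Int × Int) :=
  match (PySem.List.sorted vlan (fun x => x) false).foldl gen_ranges_py_step (none, []) with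
  | (none, acc) => acc
  | (some (s, e), acc) => acc ++ [(s, e)]

-- ===== PORT B =====
-- groupby(enumerate(vals), key=p.2 - p.1) splits vals at exactly the adjacent positions where the
-- next value is NOT previous + 1 (the key p.2 - p.1 stays constant iff each step increases by 1);
-- each group is materialized and contributes (first value, last value). gen_ranges_py_altGroup
-- transcribes that adjacent-key grouping, carrying the current group's first and last value.
def gen_ranges_py_altGroup : Int → Int → List Int → List (Int × Int)
  | s, e, [] => [(s, e)]
  | s, e, x :: xs => if x = e + 1 then gen_ranges_py_altGroup s x xs
                     else (s, e) :: gen_ranges_py_altGroup x x xs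

def gen_ranges_py_alt (vlan : List Int) : List (Int × Int) :=
  match PySem.List.sorted (PySem.Set.ofList vlan) (fun x => x) false with  -- vals = sorted(set(vlan))
  | [] => []
  | x :: xs => gen_ranges_py_altGroup x x xs

-- ===== PRECONDITION & SPEC =====
def Spec_gen_ranges_py (vlan : List Int) (out : List (Int × Int)) : Prop := out = gen_ranges_py_alt vlan
instance (vlan : List Int) (out : List (Int × Int)) : Decidable (Spec_gen_ranges_py vlan out) := by unfold Spec_gen_ranges_py; infer_instance

-- ===== CLAIM (what is proved, stated in full; the proofs are below) =====
def Claim_equal_gen_ranges_py : Prop := ∀ (vlan : List Int), Dom_gen_ranges_py vlan → Spec_gen_ranges_py vlan (gen_ranges_py vlan)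

-- ===== LEMMAS AND PROOFS =====

-- adjacent dedup of a (≤-sorted) list: drop elements equal to the previous kept one
def pvGo (e : Int) : List Int → List Int
  | [] => []
  | y :: ys => if y = e then pvGo e ys else y :: pvGo y ys

def pvDedupAdj : List Int → List Int
  | [] => []
  | x :: xs => x :: pvGo x xs

lemma pvGo_mem (e : Int) (l : List Int) (h : (e :: l).Pairwise (· ≤ ·)) (x : Int) :
    x ∈ e :: pvGo e l ↔ x ∈ e :: l := by
  induction l generalizing e with
  | nil => simp [pvGo]
  | cons y ys ih =>
    rcases List.pairwise_cons.1 h with ⟨he, hy⟩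
    by_cases hye : y = e
    · subst hye
      have hi := ih y hy
      simp only [pvGo]
      simp only [List.mem_cons] at hi ⊢
      tauto
    · have hi := ih y hy
      simp only [pvGo, if_neg hye]
      simp only [List.mem_cons] at hi ⊢
      tauto

lemma pvGo_pairwise (e : Int) (l : List Int) (h : (e :: l).Pairwise (· ≤ ·)) :
    (e :: pvGo e l).Pairwise (· < ·) := by
  induction l generalizing e with
  | nil => simp [pvGo]
  | cons y ys ih =>
    rcases List.pairwise_cons.1 h with ⟨he, hy⟩
    by_cases hye : y = e
    · subst hye
      simpa [pvGo] using ih y hy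
    · have hlt : e < y := lt_of_le_of_ne (he y (by simp)) (fun h' => hye h'.symm)
      have hyp := ih y hy
      simp only [pvGo, if_neg hye]
      refine List.pairwise_cons.2 ⟨?_, hyp⟩
      intro z hz
      rcases List.mem_cons.1 ((pvGo_mem y ys hy z).1 hz) with h1|h1
      · simpa [h1] using hlt
      · exact lt_of_lt_of_le hlt ((List.pairwise_cons.1 hy).1 z h1)

lemma pvDedupAdj_mem (l : List Int) (h : l.Pairwise (· ≤ ·)) (x : Int) :
    x ∈ pvDedupAdj l ↔ x ∈ l := by
  cases l with
  | nil => simp [pvDedupAdj]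
  | cons a as => exact pvGo_mem a as h x

lemma pvDedupAdj_pairwise (l : List Int) (h : l.Pairwise (· ≤ ·)) :
    (pvDedupAdj l).Pairwise (· < ·) := by
  cases l with
  | nil => simp [pvDedupAdj]
  | cons a as => exact pvGo_pairwise a as h

-- sorted(set(vlan)) is exactly the adjacent dedup of sorted(vlan)
lemma pvSortedSet_eq (vlan : List Int) :
    PySem.List.sorted (PySem.Set.ofList vlan) (fun x => x) false
      = pvDedupAdj (PySem.List.sorted vlan (fun x => x) false) := by
  have hs : (PySem.List.sorted vlan (fun x => x) false).Pairwise (· ≤ ·) := by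
    simpa using PySem.List.sorted_pairwise vlan (fun x => x)
  have hperm : (pvDedupAdj (PySem.List.sorted vlan (fun x => x) false)).Perm (PySem.Set.ofList vlan) := by
    refine (List.perm_ext_iff_of_nodup ?_ ?_).2 ?_
    · exact (pvDedupAdj_pairwise _ hs).nodup
    · exact PySem.Set.nodup_ofList vlan
    · intro x
      rw [pvDedupAdj_mem _ hs]
      simp [PySem.List.mem_sorted, PySem.Set.mem_ofList]
  exact PySem.List.sorted_eq_of_perm_of_pairwise_lt _ _ _ hperm
    (by simpa using pvDedupAdj_pairwise _ hs)

lemma pvStep_skip (s e : Int) (acc : List (Int × Int)) :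
    gen_ranges_py_step (some (s, e), acc) e = (some (s, e), acc) := by
  simp [gen_ranges_py_step]

lemma pvStep_ext (s e i : Int) (acc : List (Int × Int)) (h : i = e + 1) :
    gen_ranges_py_step (some (s, e), acc) i = (some (s, i), acc) := by
  simp [gen_ranges_py_step, h]

lemma pvStep_emit (s e i : Int) (acc : List (Int × Int)) (h1 : i ≠ e) (h2 : i ≠ e + 1) :
    gen_ranges_py_step (some (s, e), acc) i = (some (i, i), acc ++ [(s, e)]) := by
  simp [gen_ranges_py_step, h1, h2]

-- A's fold from a live state (s,e) over a tail l (e ≤ everything in l, l sorted) produces the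
-- accumulated yields followed by B's grouping of the adjacent dedup of l.
lemma pvFold_run (l : List Int) (s e : Int) (acc : List (Int × Int))
    (h : (e :: l).Pairwise (· ≤ ·)) :
    (match l.foldl gen_ranges_py_step (some (s, e), acc) with
    | (none, acc) => acc
    | (some (s, e), acc) => acc ++ [(s, e)])
    = acc ++ gen_ranges_py_altGroup s e (pvGo e l) := by
  induction l generalizing s e acc with
  | nil => simp [pvGo, gen_ranges_py_altGroup]
  | cons y ys ih =>
    rcases List.pairwise_cons.1 h with ⟨he, hy⟩
    by_cases hye : y = e
    · subst hye
      rw [List.foldl_cons, pvStep_skip]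
      simp only [pvGo]
      exact ih s y acc hy
    · by_cases hsucc : y = e + 1
      · rw [List.foldl_cons, pvStep_ext s e y acc hsucc]
        simp only [pvGo, if_neg hye]
        rw [ih s y acc hy]
        simp [gen_ranges_py_altGroup, hsucc]
      · rw [List.foldl_cons, pvStep_emit s e y acc hye hsucc]
        simp only [pvGo, if_neg hye]
        rw [ih y y (acc ++ [(s, e)]) hy]
        simp [gen_ranges_py_altGroup, hsucc]

-- ===== VERDICT (by name: the statement is the Claim_ definition above) =====
theorem gen_ranges_py_spec : Claim_equal_gen_ranges_py := by
  intro vlan _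
  unfold Spec_gen_ranges_py gen_ranges_py gen_ranges_py_alt
  rw [pvSortedSet_eq]
  have hs : (PySem.List.sorted vlan (fun x => x) false).Pairwise (· ≤ ·) := by
    simpa using PySem.List.sorted_pairwise vlan (fun x => x)
  cases hl : PySem.List.sorted vlan (fun x => x) false with
  | nil => simp [pvDedupAdj]
  | cons a as =>
    rw [hl] at hs
    simp only [List.foldl_cons, pvDedupAdj, gen_ranges_py_step]
    exact pvFold_run as a a [] hs
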